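-- pv_equiv track=rewrite | github.com/HexedCoder/Advent-of-Code | 2022/Day8/solution.py | check_east
-- ===== SOURCE A (Python) =====
-- def check_east(x, y, code_input):
--     list = []
--     curr = code_input[y][x]
--
--     for x_coord in range(x + 1, len(code_input)):
--
--         list.append(code_input[y][x_coord] < curr)
--         if code_input[y][x_coord] >= curr:
--             break
--
--     return list
-- ===== SOURCE B (Python) =====
-- def check_east(x, y, code_input):
--     # staged passes: clamped slice of the row, full boolean map (no early exit),
--     # then truncate at the first False
--     row = code_input[y]
--     curr = row[x]
--     flags = [v < curr for v in row[x + 1:len(code_input)]]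
--     if False in flags:
--         return flags[:flags.index(False) + 1]
--     return flags
-- ===== Notes on version B (the rewrite author's own statement) =====
-- stated objective: alternative
-- what changed: B replaces A's single early-exit scan (append-and-break per index) by staged whole-list passes: take the clamped row slice row[x+1:len(code_input)], map all of it to booleans at once, then truncate the boolean list at its first False via membership test, index and slice.
-- outside the precondition, e.g. on check_east(-2, 0, [[1, 2, 3]]): A returns [False], B returns []
import Mathlib
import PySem

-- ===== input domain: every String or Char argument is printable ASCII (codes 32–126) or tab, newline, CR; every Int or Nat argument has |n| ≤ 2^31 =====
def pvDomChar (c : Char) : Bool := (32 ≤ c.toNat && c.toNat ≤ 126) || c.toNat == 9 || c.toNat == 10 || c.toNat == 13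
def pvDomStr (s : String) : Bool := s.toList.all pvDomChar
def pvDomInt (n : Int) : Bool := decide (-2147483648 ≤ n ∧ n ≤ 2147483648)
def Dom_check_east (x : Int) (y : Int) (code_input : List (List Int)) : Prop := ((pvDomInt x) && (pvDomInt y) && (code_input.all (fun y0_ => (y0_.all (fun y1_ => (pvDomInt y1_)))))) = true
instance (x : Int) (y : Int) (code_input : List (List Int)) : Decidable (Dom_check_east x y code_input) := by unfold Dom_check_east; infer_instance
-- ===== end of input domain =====

-- B replaces A's early-exit scan by staged passes (clamped slice, full boolean map, truncate at first False);
-- proved equal on Pre_, which keeps to A's non-raising inputs with x ≥ -1 (column indices below -1 exercise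
-- A's negative-index wraparound quirk, which the slice-based B does not reproduce).


-- ===== PORT A =====
-- A's loop: for x_coord in range(x+1, len(code_input)): append(row[x_coord] < curr); break on >=.
def goA (row : List Int) (curr : Int) : List Int → List Bool
  | [] => []
  | j :: rest =>
      let v := PySem.List.pyGetD row j 0
      if v < curr then true :: goA row curr rest else [false]

def check_east (x : Int) (y : Int) (code_input : List (List Int)) : List Bool :=
  let curr := PySem.List.pyGetD (PySem.List.pyGetD code_input y []) x 0
  goA (PySem.List.pyGetD code_input y []) curr
    (PySem.List.pyRange (x + 1) (code_input.length : Int) 1)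

-- ===== PORT B =====
-- flags = [v < curr for v in row[x+1:len(code_input)]]; if False in flags: flags[:flags.index(False)+1] else flags
def check_east_alt (x : Int) (y : Int) (code_input : List (List Int)) : List Bool :=
  let row := PySem.List.pyGetD code_input y []
  let curr := PySem.List.pyGetD row x 0
  let flags := (PySem.List.slice row (some (x + 1)) (some (code_input.length : Int))).map
    (fun v => decide (v < curr))
  match PySem.List.index? flags false with
  | some i => PySem.List.slice flags none (some ((i : Int) + 1))
  | none => flags

-- ===== PRECONDITION & SPEC =====
-- Pre_ excludes (a) the inputs where Python A raises IndexError: an invalid y, an invalid x in the row,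
-- or an eastward position out of range for the row that is not shielded by an earlier blocker; and
-- (b) column indices x ≤ -2, where A returns via its negative-index wraparound quirk, which the
-- slice-based B does not reproduce (wrapped y and x = -1 stay inside Pre_ and are matched).
def preB (x : Int) (y : Int) (code_input : List (List Int)) : Bool :=
  decide (PySem.Raise.InRange code_input.length y) &&
  (let row := PySem.List.pyGetD code_input y []
   decide (-1 ≤ x) && decide (x < (row.length : Int)) &&
   (let curr := PySem.List.pyGetD row x 0
    (PySem.List.pyRange (x + 1) (code_input.length : Int) 1).all fun j =>
      decide (j < (row.length : Int)) ||
      (PySem.List.pyRange (x + 1) j 1).any fun k =>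
        decide (k < (row.length : Int)) && decide (curr ≤ PySem.List.pyGetD row k 0)))

def Pre_check_east (x : Int) (y : Int) (code_input : List (List Int)) : Prop :=
  preB x y code_input = true
instance (x : Int) (y : Int) (code_input : List (List Int)) : Decidable (Pre_check_east x y code_input) := by unfold Pre_check_east; infer_instance

def pvWitness_check_east : Int × Int × List (List Int) := (0, 0, [[3, 1, 2], [0, 5, 0], [0, 0, 0]])

def Spec_check_east (x : Int) (y : Int) (code_input : List (List Int)) (out : List Bool) : Prop := out = check_east_alt x y code_input
instance (x : Int) (y : Int) (code_input : List (List Int)) (out : List Bool) : Decidable (Spec_check_east x y code_input out) := by unfold Spec_check_east; infer_instance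

-- ===== CLAIM (what is proved, stated in full; the proofs are below) =====
def Claim_equal_check_east : Prop := ∀ (x : Int) (y : Int) (code_input : List (List Int)), Dom_check_east x y code_input → Pre_check_east x y code_input → Spec_check_east x y code_input (check_east x y code_input)

-- ===== LEMMAS AND PROOFS =====

-- B's truncation step, abstracted over the boolean list
def truncB (flags : List Bool) : List Bool :=
  match PySem.List.index? flags false with
  | some i => PySem.List.slice flags none (some ((i : Int) + 1))
  | none => flags

theorem truncB_nil : truncB [] = [] := by decide

theorem truncB_false_cons (fs : List Bool) : truncB (false :: fs) = [false] := by
  unfold truncB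
  rw [PySem.List.index?_cons_self]
  show PySem.List.slice (false :: fs) none (some (((0 : ℕ) : Int) + 1)) = [false]
  rw [PySem.List.slice_to _ (by omega)]
  simp

theorem truncB_true_cons (fs : List Bool) : truncB (true :: fs) = true :: truncB fs := by
  unfold truncB
  rw [PySem.List.index?_cons_of_ne fs (by decide)]
  cases h : PySem.List.index? fs false with
  | none => simp
  | some i =>
      simp only [Option.map_some]
      rw [PySem.List.slice_to _ (by omega), PySem.List.slice_to _ (by omega)]
      have h1 : ((i : Int) + 1 + 1).toNat = ((i : Int) + 1).toNat + 1 := by omega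
      simp [h1, List.take_succ_cons]

-- the main invariant: from any start a (x+1 ≤ a ≤ everything seen so far < curr),
-- A's break-loop over range(a, n) equals B's map-then-truncate over the slice row[a:n]
theorem goA_eq_trunc (row : List Int) (curr : Int) (n : Int) (x : Int)
    (hsh : ∀ j ∈ PySem.List.pyRange (x + 1) n 1,
      j < (row.length : Int) ∨ ∃ k ∈ PySem.List.pyRange (x + 1) j 1,
        k < (row.length : Int) ∧ curr ≤ PySem.List.pyGetD row k 0) :
    ∀ m : ℕ, ∀ a : Int, (n - a).toNat = m → x + 1 ≤ a → 0 ≤ a →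
      (∀ k, x + 1 ≤ k → k < a → PySem.List.pyGetD row k 0 < curr) →
      goA row curr (PySem.List.pyRange a n 1) =
        truncB (((row.drop a.toNat).take (n.toNat - a.toNat)).map (fun v => decide (v < curr))) := by
  intro m
  induction m with
  | zero =>
    intro a ha _ ha0 _
    have h : n ≤ a := by omega
    have : n.toNat - a.toNat = 0 := by omega
    rw [PySem.List.pyRange_one_eq_nil h, this]
    simp [goA, truncB_nil]
  | succ m ih =>
    intro a ha hxa ha0 hinv
    have h : a < n := by omega
    -- a is in range, so shielded-or-in-range; shielding contradicts the invariant
    have halen : a < (row.length : Int) := by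
      rcases hsh a (PySem.List.mem_pyRange_one.mpr ⟨hxa, h⟩) with h1 | ⟨k, hk, _, hkc⟩
      · exact h1
      · have := PySem.List.mem_pyRange_one.mp hk
        exact absurd (hinv k this.1 this.2) (by omega)
    have halen' : a.toNat < row.length := by omega
    have hdrop : row.drop a.toNat = row[a.toNat] :: row.drop (a.toNat + 1) :=
      List.drop_eq_getElem_cons halen'
    have htake : n.toNat - a.toNat = (n.toNat - (a.toNat + 1)) + 1 := by omega
    have hga : PySem.List.pyGetD row a 0 = row[a.toNat] :=
      PySem.List.pyGetD_eq_getElem row 0 ha0 halen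
    rw [PySem.List.pyRange_one_cons h, hdrop, htake]
    simp only [List.take_succ_cons, List.map_cons, goA, hga]
    by_cases hv : row[a.toNat] < curr
    · rw [if_pos hv]
      have : decide (row[a.toNat] < curr) = true := by simpa using hv
      rw [this, truncB_true_cons]
      have : (a + 1).toNat = a.toNat + 1 := by omega
      rw [ih (a + 1) (by omega) (by omega) (by omega)
        (fun k hk1 hk2 => by
          by_cases hke : k = a
          · rw [hke, hga]; exact hv
          · exact hinv k hk1 (by omega)), this]
    · rw [if_neg hv]
      have : decide (row[a.toNat] < curr) = false := by simpa using hv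
      rw [this, truncB_false_cons]

-- ===== VERDICT (by name: the statement is the Claim_ definition above) =====
theorem check_east_spec : Claim_equal_check_east := by
  intro x y code_input _ hpre
  unfold Pre_check_east preB at hpre
  simp only [Bool.and_eq_true, decide_eq_true_eq, List.all_eq_true, List.any_eq_true,
    Bool.or_eq_true] at hpre
  obtain ⟨hy, ⟨hx1, hx2⟩, hsh⟩ := hpre
  clear hy
  unfold Spec_check_east check_east check_east_alt
  have hx0 : (0 : Int) ≤ x + 1 := by omega
  have hn0 : (0 : Int) ≤ (code_input.length : Int) := by positivity
  show goA (PySem.List.pyGetD code_input y []) (PySem.List.pyGetD (PySem.List.pyGetD code_input y []) x 0) (PySem.List.pyRange (x + 1) (code_input.length : Int) 1) =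
    truncB ((PySem.List.slice (PySem.List.pyGetD code_input y []) (some (x + 1)) (some (code_input.length : Int))).map
      (fun v => decide (v < PySem.List.pyGetD (PySem.List.pyGetD code_input y []) x 0)))
  rw [PySem.List.slice_toNat _ hx0 hn0]
  exact goA_eq_trunc _ _ _ x hsh ((code_input.length : Int) - (x + 1)).toNat (x + 1) rfl le_rfl hx0
    (fun k hk1 hk2 => absurd hk1 (by omega))
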